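-- pv_equiv track=rewrite | github.com/khushnaidu/CRISPR-Cas9-Biopython-Project | step1-4.py | find_viable_gRNA
-- ===== SOURCE A (Python) =====
-- def find_viable_gRNA(genome_list):
--     all_genomes_gRNA = []
--     for a_genome in genome_list:
--         all_GRNA_sequnces_current = []
--         counter1 = 0
--         counter2 = 1
--         for i in a_genome:
--             if(counter2 < len(a_genome) and a_genome[counter1] == "G" and a_genome[counter2] == "G" and counter1 >= 20):
--                 all_GRNA_sequnces_current.append(a_genome[counter1-20:counter2])
--             if(counter2 == len(a_genome)):
--                 break
--             counter1+=1
--             counter2+=1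
--         all_genomes_gRNA.append(all_GRNA_sequnces_current)
--     return all_genomes_gRNA
-- ===== SOURCE B (Python) =====
-- def find_viable_gRNA(genome_list):
--     def grnas(g):
--         # stage 1: index every 'G' position once
--         gpos = [i for i, ch in enumerate(g) if ch == 'G']
--         # stage 2: adjacent-pair join over the index list: q == p+1 means "GG" at p
--         return [g[p - 20:p + 1] for p, q in zip(gpos, gpos[1:]) if q == p + 1 and p >= 20]
--     return [grnas(g) for g in genome_list]
-- ===== Notes on version B (the rewrite author's own statement) =====
-- stated objective: alternative
-- what changed: Instead of A's per-character two-counter walk testing each window for 'GG', B first builds the list of all 'G' positions via enumerate, then detects PAM sites as consecutive entries (q == p+1) in that index list via a zip adjacent-pair join, slicing the 21bp window for each adjacent pair with p >= 20.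
import Mathlib
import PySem

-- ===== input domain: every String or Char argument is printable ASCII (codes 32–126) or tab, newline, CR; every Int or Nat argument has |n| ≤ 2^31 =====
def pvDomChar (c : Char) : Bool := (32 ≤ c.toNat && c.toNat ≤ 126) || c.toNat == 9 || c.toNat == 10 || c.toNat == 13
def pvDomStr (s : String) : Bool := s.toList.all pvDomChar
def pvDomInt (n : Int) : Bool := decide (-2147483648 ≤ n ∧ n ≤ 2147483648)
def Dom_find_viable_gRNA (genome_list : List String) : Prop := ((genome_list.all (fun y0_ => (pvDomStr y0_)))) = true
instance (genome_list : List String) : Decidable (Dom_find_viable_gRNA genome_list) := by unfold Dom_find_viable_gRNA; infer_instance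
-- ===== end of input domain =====

-- B replaces A's per-character two-counter 'GG' window walk by two staged passes: build the list
-- of all 'G' positions, then detect PAM sites as consecutive entries of that index list (alternative, same cost).

-- ===== PORT A =====
-- inner 'for i in a_genome' loop of A: rem is what remains of the iterated string, c1/c2 the two counters
def pvAGo (t : List Char) (rem : List Char) (c1 c2 : Nat) (acc : List String) : List String :=
  match rem with
  | [] => acc
  | _ :: rest =>
    let acc' := if c2 < t.length ∧ PySem.Chars.pyGet? t (c1 : Int) = some 'G' ∧
                   PySem.Chars.pyGet? t (c2 : Int) = some 'G' ∧ 20 ≤ c1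
      then acc ++ [String.ofList (PySem.Chars.slice t (some ((c1 : Int) - 20)) (some (c2 : Int)))]
      else acc
    if c2 = t.length then acc' else pvAGo t rest (c1 + 1) (c2 + 1) acc'

def find_viable_gRNA (genome_list : List String) : List (List String) :=
  genome_list.foldl (fun all g => all ++ [pvAGo g.toList g.toList 0 1 []]) []

-- ===== PORT B =====
-- B's per-genome helper 'grnas': gpos = [i for i, ch in enumerate(g) if ch == 'G'];
-- then the comprehension over zip(gpos, gpos[1:]) keeping q == p+1 and p >= 20 (gpos[1:] ported as drop 1)
def pvBGrnas (g : String) : List String :=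
  let t := g.toList
  let gpos := ((PySem.List.enumerate t 0).filter (fun pc => pc.2 == 'G')).map (·.1)
  ((gpos.zip (gpos.drop 1)).filter (fun pq => pq.2 == pq.1 + 1 && decide (20 ≤ pq.1))).map
    (fun pq => String.ofList (PySem.Chars.slice t (some (pq.1 - 20)) (some (pq.1 + 1))))

def find_viable_gRNA_alt (genome_list : List String) : List (List String) :=
  genome_list.map pvBGrnas

-- ===== PRECONDITION & SPEC =====
def Spec_find_viable_gRNA (genome_list : List String) (out : List (List String)) : Prop := out = find_viable_gRNA_alt genome_list
instance (genome_list : List String) (out : List (List String)) : Decidable (Spec_find_viable_gRNA genome_list out) := by unfold Spec_find_viable_gRNA; infer_instance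

-- ===== CLAIM (what is proved, stated in full; the proofs are below) =====
def Claim_equal_find_viable_gRNA : Prop := ∀ (genome_list : List String), Dom_find_viable_gRNA genome_list → Spec_find_viable_gRNA genome_list (find_viable_gRNA genome_list)

-- ===== LEMMAS AND PROOFS =====

-- 'GG at position c' as A tests it
def pvHit (t : List Char) (c : Nat) : Bool := (t[c]? == some 'G') && (t[c + 1]? == some 'G')

-- the canonical per-genome result; both loops are proved equal to it
def pvOutFrom (t : List Char) (k : Nat) : List String :=
  ((List.range' k (t.length - k)).filter (fun c => pvHit t c && 20 ≤ c)).map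
    (fun (c : Nat) => String.ofList (PySem.Chars.slice t (some ((c : Int) - 20)) (some ((c : Int) + 1))))

theorem pvAGo_spec (t : List Char) :
    ∀ rem k acc, t.drop k = rem → k < t.length →
      pvAGo t rem k (k + 1) acc = acc ++ pvOutFrom t k := by
  intro rem
  induction rem with
  | nil => intro k acc h hk; have := List.drop_eq_nil_iff.mp h; omega
  | cons x rest ih =>
    intro k acc h hk
    have hrest : t.drop (k + 1) = rest := by
      have h2 : t.drop (k+1) = (t.drop k).drop 1 := by rw [List.drop_drop]
      simp [h2, h]
    have hcond : (k + 1 < t.length ∧ PySem.Chars.pyGet? t (k : Int) = some 'G' ∧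
        PySem.Chars.pyGet? t (((k+1 : Nat)) : Int) = some 'G' ∧ 20 ≤ k)
        ↔ ((pvHit t k && 20 ≤ k) = true) := by
      simp only [pvHit, PySem.Chars.pyGet?_eq_listPyGet?, PySem.List.pyGet?_natCast,
        Bool.and_eq_true, beq_iff_eq, decide_eq_true_eq]
      constructor
      · rintro ⟨_, h1, h2, h3⟩; exact ⟨⟨h1, h2⟩, h3⟩
      · rintro ⟨⟨h1, h2⟩, h3⟩
        exact ⟨(List.getElem?_eq_some_iff.mp h2).1, h1, h2, h3⟩
    have hrng : t.length - k = (t.length - (k+1)) + 1 := by omega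
    rw [pvAGo]
    by_cases hb : k + 1 = t.length
    · rw [if_pos hb]
      have hhitf : (pvHit t k && 20 ≤ k) = false := by
        rw [Bool.eq_false_iff]
        intro hcc
        have h2 := (Bool.and_eq_true .. ▸ hcc).1
        simp only [pvHit, Bool.and_eq_true, beq_iff_eq] at h2
        obtain ⟨hlt2, -⟩ := List.getElem?_eq_some_iff.mp h2.2
        omega
      rw [if_neg (fun hc => by rw [hcond] at hc; simp [hc] at hhitf)]
      unfold pvOutFrom
      rw [hrng, List.range'_succ, List.filter_cons]
      have hz : t.length - (k+1) = 0 := by omega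
      simp [hhitf, hz]
    · have hlt : k + 1 < t.length := by omega
      rw [if_neg hb]
      rw [ih (k+1) _ hrest hlt]
      unfold pvOutFrom
      rw [hrng, List.range'_succ, List.filter_cons]
      by_cases hh : (pvHit t k && 20 ≤ k) = true
      · rw [if_pos (hcond.mpr hh), if_pos hh]
        push_cast [List.append_assoc]
        simp
      · rw [if_neg (fun hc => hh (hcond.mp hc)), if_neg hh]

-- members of a filtered range' are at least its start
theorem pvMemFilterRange_ge (P : Nat → Bool) (k m b : Nat)
    (hb : b ∈ (List.range' k m).filter P) : k ≤ b :=
  (List.mem_range'_1.mp (List.mem_of_mem_filter hb)).1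

-- the adjacent-pair join over the filtered index list equals the direct filter for P at i and i+1
theorem pvAdj (P : Nat → Bool) :
    ∀ m k, P (k + m) = false →
      ((((List.range' k m).filter P).zip (((List.range' k m).filter P).drop 1)).filter
          (fun pq => pq.2 == pq.1 + 1))
        = ((List.range' k m).filter (fun i => P i && P (i + 1))).map (fun i => (i, i + 1)) := by
  intro m
  induction m with
  | zero => intro k _; simp
  | succ n ih =>
    intro k hP
    have hP' : P (k + 1 + n) = false := by
      have : k + 1 + n = k + (n + 1) := by omega
      rw [this]; exact hP
    rw [List.range'_succ, List.filter_cons, List.filter_cons]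
    by_cases hk : P k = true
    · rw [if_pos hk]
      cases n with
      | zero =>
        have hk1 : P (k + 1) = false := by simpa using hP
        simp [hk1]
      | succ n' =>
        rw [List.range'_succ, List.filter_cons]
        by_cases hk1 : P (k + 1) = true
        · rw [if_pos hk1]
          have ihh := ih (k + 1) hP'
          rw [List.range'_succ, List.filter_cons, if_pos hk1] at ihh
          simp only [List.drop_one, List.tail_cons, List.zip_cons_cons, List.filter_cons] at ihh ⊢
          rw [if_pos (by simp), if_pos (by simp [hk, hk1]), ihh, List.map_cons]
        · rw [if_neg hk1]
          have ihh := ih (k + 1) hP'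
          rw [List.range'_succ, List.filter_cons, if_neg hk1] at ihh
          rw [if_neg (by simp [hk1] : ¬((P k && P (k + 1)) = true))]
          rcases hrec : (List.range' (k + 1 + 1) n').filter P with _ | ⟨b, r⟩
          · rw [hrec] at ihh; simpa using ihh
          · have hb : k + 1 + 1 ≤ b := pvMemFilterRange_ge P (k + 1 + 1) n' b (by rw [hrec]; simp)
            rw [hrec] at ihh
            simp only [List.drop_one, List.tail_cons, List.zip_cons_cons, List.filter_cons] at ihh ⊢
            rw [if_neg (by simp; omega)]
            exact ihh
    · rw [if_neg hk]
      rw [if_neg (by simp [hk] : ¬((P k && P (k + 1)) = true))]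
      exact ih (k + 1) hP'

-- stage 1 of B: the enumerate-filter-map pass computes the 'G' positions (shifted by the start s)
theorem pvGpos_spec (t : List Char) :
    ∀ (s : Int), ((PySem.List.enumerate t s).filter (fun pc => pc.2 == 'G')).map (·.1)
      = ((List.range t.length).filter (fun i => t[i]? == some 'G')).map (fun (i : Nat) => s + (i : Int)) := by
  induction t with
  | nil => intro s; simp [PySem.List.enumerate_nil]
  | cons c rest ih =>
    intro s
    have hfe : ((fun i => (c :: rest)[i]? == some 'G') ∘ Nat.succ) = (fun i => rest[i]? == some 'G') := by
      funext i; simp [Nat.succ_eq_add_one]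
    have htail : ((PySem.List.enumerate rest (s + 1)).filter (fun pc => pc.2 == 'G')).map (·.1)
        = (((List.range rest.length).filter ((fun i => (c :: rest)[i]? == some 'G') ∘ Nat.succ)).map Nat.succ).map (fun (i : Nat) => s + (i : Int)) := by
      rw [hfe, List.map_map, ih (s + 1)]
      exact List.map_congr_left (fun i _ => by
        simp only [Function.comp_apply, Nat.succ_eq_add_one]
        push_cast; ring)
    rw [PySem.List.enumerate_cons, List.filter_cons]
    simp only [List.length_cons, List.range_succ_eq_map, List.filter_cons, List.filter_map]
    by_cases hc : (c == 'G') = true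
    · rw [if_pos hc, if_pos (by simpa using hc)]
      simp only [List.map_cons, Nat.cast_zero, Int.add_zero]
      exact congrArg _ htail
    · rw [if_neg hc, if_neg (by simpa using hc)]
      exact htail

-- per-genome equality of the two programs
theorem pv_per_genome (g : String) :
    pvAGo g.toList g.toList 0 1 [] = pvBGrnas g := by
  set t := g.toList with ht
  have hB : pvBGrnas g = pvOutFrom t 0 := by
    unfold pvBGrnas
    rw [← ht]
    simp only []
    set P : Nat → Bool := fun i => t[i]? == some 'G' with hPdef
    have h1 : ((PySem.List.enumerate t 0).filter (fun pc => pc.2 == 'G')).map (·.1)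
        = ((List.range t.length).filter P).map (fun (i : Nat) => (i : Int)) := by
      rw [pvGpos_spec t 0, hPdef]; simp
    rw [h1, ← List.map_drop, List.zip_map, List.filter_map, List.map_map]
    have h2 : ((fun pq : Nat × Nat => pq.2 == pq.1 + 1 && decide (20 ≤ pq.1))) =
        ((fun pq : Int × Int => pq.2 == pq.1 + 1 && decide (20 ≤ pq.1)) ∘ Prod.map (fun (i : Nat) => (i : Int)) (fun (i : Nat) => (i : Int))) := by
      funext pq
      obtain ⟨a, b⟩ := pq
      simp only [Function.comp_apply, Prod.map_apply]
      rw [Bool.eq_iff_iff]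
      simp only [Bool.and_eq_true, beq_iff_eq, decide_eq_true_eq]
      omega
    rw [← h2]
    have h3 : (List.range t.length).filter P = (List.range' 0 t.length).filter P := by
      rw [List.range_eq_range']
    rw [h3]
    have hPend : P (0 + t.length) = false := by simp [hPdef]
    have h5 : ((((List.range' 0 t.length).filter P).zip (((List.range' 0 t.length).filter P).drop 1)).filter
          (fun pq => pq.2 == pq.1 + 1 && decide (20 ≤ pq.1)))
        = (((((List.range' 0 t.length).filter P).zip (((List.range' 0 t.length).filter P).drop 1)).filter
          (fun pq => pq.2 == pq.1 + 1)).filter (fun pq => decide (20 ≤ pq.1))) := by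
      rw [List.filter_filter]
      congr 1
      funext pq
      rw [Bool.and_comm]
    rw [h5, pvAdj P t.length 0 hPend, List.filter_map, List.map_map]
    unfold pvOutFrom
    rw [Nat.sub_zero, List.filter_filter]
    have hfilt : ((List.range' 0 t.length).filter
          (fun a => ((fun pq : Nat × Nat => decide (20 ≤ pq.1)) ∘ fun i => (i, i + 1)) a && (P a && P (a + 1))))
        = ((List.range' 0 t.length).filter (fun c => pvHit t c && 20 ≤ c)) := by
      congr 1
      funext c
      simp only [Function.comp_apply, pvHit, hPdef]
      rw [Bool.and_comm]
    rw [hfilt]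
    exact List.map_congr_left (fun c _ => by simp [Prod.map])
  rw [hB]
  rcases hg : t with _ | ⟨x, rest⟩
  · simp [pvAGo, pvOutFrom]
  · rw [← hg]
    exact pvAGo_spec t t 0 [] (by simp) (by rw [hg]; simp)

-- ===== VERDICT (by name: the statement is the Claim_ definition above) =====
theorem find_viable_gRNA_spec : Claim_equal_find_viable_gRNA := by
  intro gl _
  unfold Spec_find_viable_gRNA find_viable_gRNA find_viable_gRNA_alt
  rw [PySem.List.foldl_append_singleton_eq_map]
  exact List.map_congr_left fun g _ => pv_per_genome g
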